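-- pv_equiv track=rewrite | github.com/isk02206/python | informatics/BA_1 2017-2018/exam prep/Stop codons.py | codons
-- ===== SOURCE A (Python) =====
-- def reverseComplement(codon):
--     '''
--     >>> reverseComplement('AAGTC')
--     'GACTT'
--     >>> reverseComplement('agcttcgt')
--     'ACGAAGCT'
--     >>> reverseComplement('AGTCTTACGCTTA')
--     'TAAGCGTAAGACT'
--     '''
--     reverseComplement = []
--     reverseCodon = codon[::-1]
--     for code in reverseCodon:
--         if code == 'a' or code == 'A':
--             reverseComplement.append('T')
--         if code == 'g' or code == 'G':
--             reverseComplement.append('C')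
--         if code == 't' or code == 'T':
--             reverseComplement.append('A')
--         if code == 'c' or code == 'C':
--             reverseComplement.append('G')
--     return ''.join(reverseComplement)
--
-- def codons(seq, number):
--     '''
--     >>> seq = 'TTTACTATAGTGATAGCCGGTAACATAGCTCCTAGAATAAAGGCAACGCAATACCCCTAGG'
--     >>> codons(seq, +1)
--     'TTT-ACT-ATA-GTG-ATA-GCC-GGT-AAC-ATA-GCT-CCT-AGA-ATA-AAG-GCA-ACG-CAA-TAC-CCC-TAG-G'
--     >>> codons(seq, +2)
--     'T-TTA-CTA-TAG-TGA-TAG-CCG-GTA-ACA-TAG-CTC-CTA-GAA-TAA-AGG-CAA-CGC-AAT-ACC-CCT-AGG'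
--     >>> codons(seq, +3)
--     'TT-TAC-TAT-AGT-GAT-AGC-CGG-TAA-CAT-AGC-TCC-TAG-AAT-AAA-GGC-AAC-GCA-ATA-CCC-CTA-GG'
--     >>> codons(seq, -1)
--     'CCT-AGG-GGT-ATT-GCG-TTG-CCT-TTA-TTC-TAG-GAG-CTA-TGT-TAC-CGG-CTA-TCA-CTA-TAG-TAA-A'
--     >>> codons(seq, -2)
--     'C-CTA-GGG-GTA-TTG-CGT-TGC-CTT-TAT-TCT-AGG-AGC-TAT-GTT-ACC-GGC-TAT-CAC-TAT-AGT-AAA'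
--     >>> codons(seq, -3)
--     'CC-TAG-GGG-TAT-TGC-GTT-GCC-TTT-ATT-CTA-GGA-GCT-ATG-TTA-CCG-GCT-ATC-ACT-ATA-GTA-AA'
--     '''
--     codon = []
--     count = 0
--
--     if number < 0:
--         seq = reverseComplement(seq)
--         number = abs(number)
--
--     if number == 1:
--         count = 0
--     if number == 2:
--         count = 2
--     if number == 3:
--         count = 1
--
--     for i in range(len(seq)):
--         codon.append(seq[i])
--         count +=1
--         if count == 3 and i != (len(seq)-1):
--             count = 0
--             codon.append('-')
--
--     return ''.join(codon)
-- ===== SOURCE B (Python) =====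
-- def codons(seq, number):
--     if number < 0:
--         comp = {'A': 'T', 'a': 'T', 'G': 'C', 'g': 'C',
--                 'T': 'A', 't': 'A', 'C': 'G', 'c': 'G'}
--         seq = ''.join(comp[c] for c in reversed(seq) if c in comp)
--         number = -number
--     g = 1 if number == 2 else 2 if number == 3 else 3
--     chunks = [seq[:g]] + [seq[i:i+3] for i in range(g, len(seq), 3)]
--     return '-'.join(c for c in chunks if c)
-- ===== Notes on version B (the rewrite author's own statement) =====
-- stated objective: simpler
-- what changed: A's running-counter walk (append each char, bump a counter, conditionally emit a dash) is replaced by computing the first-group size from the frame number and slicing the sequence into chunks joined with '-'; the char-by-char complement ifs become one dict lookup.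
import Mathlib
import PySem

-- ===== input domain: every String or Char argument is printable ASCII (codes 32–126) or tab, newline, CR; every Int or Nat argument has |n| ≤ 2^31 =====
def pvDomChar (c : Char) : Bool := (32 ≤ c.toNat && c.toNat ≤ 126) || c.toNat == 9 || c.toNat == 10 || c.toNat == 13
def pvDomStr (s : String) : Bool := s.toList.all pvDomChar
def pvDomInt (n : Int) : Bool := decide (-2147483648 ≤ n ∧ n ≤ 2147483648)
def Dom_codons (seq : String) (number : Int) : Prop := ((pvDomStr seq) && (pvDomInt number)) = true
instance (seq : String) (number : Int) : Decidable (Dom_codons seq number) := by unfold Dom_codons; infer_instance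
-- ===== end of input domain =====

-- B replaces A's running-counter walk (append each char, bump a counter, conditionally emit a dash)
-- by precomputing the first-group size and slicing the sequence into chunks joined with '-' (objective: simpler).

-- ===== PORT A =====
-- reverseComplement: reverse, then four sequential ifs appending the complement (non-ACGT silently dropped)
def revCompA_step (acc : List Char) (code : Char) : List Char :=
  let acc := if code == 'a' || code == 'A' then acc ++ ['T'] else acc
  let acc := if code == 'g' || code == 'G' then acc ++ ['C'] else acc
  let acc := if code == 't' || code == 'T' then acc ++ ['A'] else acc
  let acc := if code == 'c' || code == 'C' then acc ++ ['G'] else acc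
  acc

def revCompA (codon : List Char) : List Char :=
  codon.reverse.foldl revCompA_step []

-- the body of A's `for i in range(len(seq))` loop; state = (codon, count)
def codonsA_step (cs : List Char) (st : List Char × Int) (i : Int) : List Char × Int :=
  let codon := st.1 ++ [PySem.List.pyGetD cs i ' ']   -- seq[i]; i ∈ range(len(seq)) is always in range
  let count := st.2 + 1
  if count == 3 && !(i == (cs.length : Int) - 1) then (codon ++ ['-'], 0) else (codon, count)

def codons (seq : String) (number : Int) : String :=
  let cs0 := seq.toList
  let cs := if number < 0 then revCompA cs0 else cs0
  let number := if number < 0 then |number| else number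
  let count : Int := 0
  let count := if number == 1 then 0 else count
  let count := if number == 2 then 2 else count
  let count := if number == 3 then 1 else count
  let res := (PySem.List.pyRange 0 (cs.length : Int) 1).foldl (codonsA_step cs) ([], count)
  String.ofList res.1

-- ===== PORT B =====
-- the comp dict: `comp[c] if c in comp` as one optional lookup
def compB? (c : Char) : Option Char :=
  if c == 'A' || c == 'a' then some 'T'
  else if c == 'G' || c == 'g' then some 'C'
  else if c == 'T' || c == 't' then some 'A'
  else if c == 'C' || c == 'c' then some 'G'
  else none

def codons_alt (seq : String) (number : Int) : String :=
  let cs0 := seq.toList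
  let cs := if number < 0 then cs0.reverse.filterMap compB? else cs0
  let n := if number < 0 then -number else number
  let g : Int := if n == 2 then 1 else if n == 3 then 2 else 3
  let chunks := PySem.List.slice cs (some 0) (some g) ::
    (PySem.List.pyRange g (cs.length : Int) 3).map (fun i => PySem.List.slice cs (some i) (some (i + 3)))
  String.ofList (List.intercalate ['-'] (chunks.filter (fun c => !c.isEmpty)))

-- ===== PRECONDITION & SPEC =====
def Spec_codons (seq : String) (number : Int) (out : String) : Prop := out = codons_alt seq number
instance (seq : String) (number : Int) (out : String) : Decidable (Spec_codons seq number out) := by unfold Spec_codons; infer_instance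

-- ===== CLAIM (what is proved, stated in full; the proofs are below) =====
def Claim_equal_codons : Prop := ∀ (seq : String) (number : Int), Dom_codons seq number → Spec_codons seq number (codons seq number)

-- ===== LEMMAS AND PROOFS =====

-- A's four sequential conditional appends per char = one optional-complement lookup
lemma revCompA_step_eq (acc : List Char) (c : Char) :
    revCompA_step acc c = acc ++ (compB? c).toList := by
  by_cases h1 : c = 'a'; · subst h1; rfl
  by_cases h2 : c = 'A'; · subst h2; rfl
  by_cases h3 : c = 'g'; · subst h3; rfl
  by_cases h4 : c = 'G'; · subst h4; rfl
  by_cases h5 : c = 't'; · subst h5; rfl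
  by_cases h6 : c = 'T'; · subst h6; rfl
  by_cases h7 : c = 'c'; · subst h7; rfl
  by_cases h8 : c = 'C'; · subst h8; rfl
  simp [revCompA_step, compB?, h1, h2, h3, h4, h5, h6, h7, h8]

lemma foldl_revCompA_step (l acc : List Char) :
    l.foldl revCompA_step acc = acc ++ l.filterMap compB? := by
  induction l generalizing acc with
  | nil => simp
  | cons x r ih =>
    simp only [List.foldl_cons, List.filterMap_cons, revCompA_step_eq]
    cases h : compB? x <;> simp [ih]

lemma revCompA_eq (cs : List Char) : revCompA cs = cs.reverse.filterMap compB? := by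
  rw [revCompA, foldl_revCompA_step]; simp only [List.nil_append]

-- structural form of A's dash-walk
def walk : List Char → Int → List Char
  | [], _ => []
  | x :: rest, c =>
    if c + 1 == 3 && !rest.isEmpty then x :: '-' :: walk rest 0
    else x :: walk rest (c + 1)

lemma foldl_nat (cs : List Char) (c : Int) (acc : List Char) :
    ((List.range cs.length).foldl (fun st (k : Nat) => codonsA_step cs st (k : Int)) (acc, c)).1
      = acc ++ walk cs c := by
  induction cs generalizing c acc with
  | nil => simp [walk]
  | cons x rest ih =>
    rw [List.length_cons, List.range_succ_eq_map, List.foldl_cons, List.foldl_map]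
    rw [PySem.List.foldl_congr_mem _ _ (fun st (k : Nat) => codonsA_step rest st (k : Int)) _ ?_]
    · have hfst : codonsA_step (x :: rest) (acc, c) ((0 : Nat) : Int)
          = if c + 1 == 3 && !rest.isEmpty then (acc ++ [x, '-'], 0) else (acc ++ [x], c + 1) := by
        simp [codonsA_step]
        by_cases hr : rest = [] <;> simp [hr] <;> split <;> simp_all
        intro h3
        exact absurd (List.length_eq_zero_iff.mp ((‹c + 1 = 3 → 0 = (rest.length:Int)› h3).symm |> (by exact_mod_cast ·))) hr
      rw [hfst]
      by_cases hc : (c + 1 == 3 && !rest.isEmpty) = true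
      · simp only [hc, walk, ih]
        simp
      · simp only [walk]
        rw [if_neg hc, if_neg (by simp_all), ih]
        simp
    · intro st k hk
      simp only [List.mem_range] at hk
      show codonsA_step (x :: rest) st ((k : Int) + 1) = codonsA_step rest st (k : Int)
      have h1 : PySem.List.pyGetD (x :: rest) ((k : Int) + 1) ' ' = PySem.List.pyGetD rest (k : Int) ' ' := by
        have : ((k : Int) + 1) = ((k + 1 : Nat) : Int) := by push_cast; ring
        rw [this, PySem.List.pyGetD_natCast, PySem.List.pyGetD_natCast]
        rfl
      have h2 : (((k : Int) + 1) == ((x :: rest).length : Int) - 1) = ((k : Int) == (rest.length : Int) - 1) := by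
        simp only [List.length_cons]
        push_cast
        by_cases h : (k : Int) = (rest.length : Int) - 1 <;> simp [h] <;> omega
      simp only [codonsA_step, h1, h2]

lemma foldl_codonsA_step (cs : List Char) (c : Int) (acc : List Char) :
    ((PySem.List.pyRange 0 (cs.length : Int) 1).foldl (codonsA_step cs) (acc, c)).1
      = acc ++ walk cs c := by
  rw [PySem.List.pyRange_one, List.foldl_map,
    show (((cs.length : Int)) - 0).toNat = cs.length by omega]
  rw [← foldl_nat cs c acc]
  exact congrArg Prod.fst (PySem.List.foldl_congr_mem (List.range cs.length) (fun st (k : Nat) => codonsA_step cs st (0 + (k : Int))) (fun st (k : Nat) => codonsA_step cs st (k : Int)) ((acc, c)) (fun st k _ => by show codonsA_step cs st (0 + (k : Int)) = codonsA_step cs st (k : Int); rw [zero_add]))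

-- structural form of B's triple chunks
def triples : List Char → List (List Char)
  | [] => []
  | x :: r => (x :: r.take 2) :: triples (r.drop 2)
termination_by l => l.length
decreasing_by simp

lemma triples_eq (l : List Char) :
    triples l = if l = [] then [] else l.take 3 :: triples (l.drop 3) := by
  cases l <;> simp [triples]

lemma triples_ne_nil (l : List Char) : ∀ t ∈ triples l, t ≠ [] := by
  induction l using triples.induct with
  | case1 => simp [triples]
  | case2 x r ih =>
    intro t ht
    simp only [triples, List.mem_cons] at ht
    rcases ht with h | h
    · simp [h]
    · exact ih t h

lemma pyRange3_nil (a b : Int) (h : b ≤ a) : PySem.List.pyRange a b 3 = [] := by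
  rw [PySem.List.pyRange_of_pos _ _ (by norm_num)]
  rw [if_neg (by omega : ¬ a < b)]
  simp

lemma pyRange3_cons (a b : Int) (h : a < b) :
    PySem.List.pyRange a b 3 = a :: PySem.List.pyRange (a + 3) b 3 := by
  rw [PySem.List.pyRange_of_pos _ _ (by norm_num), PySem.List.pyRange_of_pos _ _ (by norm_num)]
  by_cases h2 : a + 3 < b
  · have e : ((b - a + 3 - 1) / 3).toNat = ((b - (a + 3) + 3 - 1) / 3).toNat + 1 := by omega
    simp only [if_pos h, if_pos h2, e, List.range_succ_eq_map, List.map_map, List.map_cons]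
    refine congrArg₂ _ (by push_cast; ring) (List.map_congr_left fun k _ => ?_)
    simp only [Function.comp]; push_cast; ring
  · have e : ((b - a + 3 - 1) / 3).toNat = 1 := by omega
    simp [h, h2, e]

lemma map_slice_eq_triples (d : Nat) : ∀ (cs : List Char) (g : Nat), cs.length - g ≤ d →
    (PySem.List.pyRange (g : Int) (cs.length : Int) 3).map
        (fun i => PySem.List.slice cs (some i) (some (i + 3))) = triples (cs.drop g) := by
  induction d with
  | zero =>
    intro cs g h
    have hge : cs.length ≤ g := by omega
    rw [pyRange3_nil _ _ (by exact_mod_cast hge), List.drop_eq_nil_of_le hge]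
    simp [triples]
  | succ d ih =>
    intro cs g h
    by_cases hlt : g < cs.length
    · rw [pyRange3_cons _ _ (by exact_mod_cast hlt), List.map_cons]
      have hs : PySem.List.slice cs (some (g : Int)) (some ((g : Int) + 3)) = List.take 3 (List.drop g cs) := by
        simpa using PySem.List.slice_natCast_add cs g 3
      rw [hs, show ((g : Int) + 3) = ((g + 3 : Nat) : Int) by push_cast; ring, ih cs (g + 3) (by omega)]
      rw [triples_eq (cs.drop g)]
      have hne : cs.drop g ≠ [] := by
        simp [List.drop_eq_nil_iff]; omega
      rw [if_neg hne, ← List.drop_drop]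
    · have hge : cs.length ≤ g := by omega
      rw [pyRange3_nil _ _ (by exact_mod_cast hge), List.drop_eq_nil_of_le hge]
      simp [triples]

lemma inter_cons2 (s a b : List Char) (L : List (List Char)) :
    List.intercalate s (a :: b :: L) = a ++ s ++ List.intercalate s (b :: L) := by
  simp [List.intercalate, List.intersperse]

lemma inter_single (s a : List Char) : List.intercalate s [a] = a := by
  simp [List.intercalate]

lemma inter_pull (s : List Char) (x : Char) (t : List Char) (L : List (List Char)) :
    List.intercalate s ((x :: t) :: L) = x :: List.intercalate s (t :: L) := by
  cases L with
  | nil => rw [inter_single, inter_single]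
  | cons b L' => rw [inter_cons2, inter_cons2]; simp

lemma filter_triples (l : List Char) :
    (triples l).filter (fun c => !c.isEmpty) = triples l :=
  List.filter_eq_self.mpr (fun t ht => by simpa [List.isEmpty_iff] using triples_ne_nil l t ht)

lemma walk_eq_join (cs : List Char) : ∀ (g : Nat), 1 ≤ g → g ≤ 3 →
    walk cs (3 - (g : Int)) =
      List.intercalate ['-'] ((cs.take g :: triples (cs.drop g)).filter (fun c => !c.isEmpty)) := by
  induction cs with
  | nil => intro g h1 h3; simp [walk, triples, List.intercalate]
  | cons x rest ih =>
    intro g h1 h3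
    have hstep : (x :: rest).take g = x :: rest.take (g - 1) := by
      cases g with | zero => omega | succ n => simp
    have hdrop : (x :: rest).drop g = rest.drop (g - 1) := by
      cases g with | zero => omega | succ n => simp
    rw [hstep, hdrop]
    rw [List.filter_cons, if_pos (by simp), filter_triples]
    by_cases hg : g = 1
    · subst hg
      simp only [Nat.sub_self, List.take_zero, List.drop_zero]
      by_cases hr : rest = []
      · subst hr
        simp [walk, triples, inter_single]
      · have hcond : ((3 - ((1:Nat):Int)) + 1 == 3 && !(rest.isEmpty)) = true := by simp [hr]
        rw [walk, if_pos hcond]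
        have ihr := ih 3 (by norm_num) (by norm_num)
        rw [show (3 - ((3:Nat):Int)) = 0 by norm_num] at ihr
        rw [List.filter_cons, filter_triples] at ihr
        rw [triples_eq rest, if_neg hr]
        have htk3 : (rest.take 3).isEmpty = false := by
          simp [List.isEmpty_iff, List.take_eq_nil_iff]; exact hr
        rw [htk3] at ihr
        simp only [Bool.not_false, if_pos] at ihr
        rw [ihr, inter_cons2]
        simp
    · have hg2 : 2 ≤ g := by omega
      have hcond : ((3 - ((g:Nat):Int)) + 1 == 3 && !(rest.isEmpty)) = false := by
        simp only [Bool.and_eq_false_iff, beq_eq_false_iff_ne]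
        left; intro hh; omega
      rw [walk, if_neg (by simp [hcond])]
      have e : (3 - ((g:Nat):Int)) + 1 = 3 - (((g-1 : Nat)):Int) := by
        push_cast [Nat.cast_sub (by omega : 1 ≤ g)]; ring
      rw [e, ih (g-1) (by omega) (by omega)]
      rw [List.filter_cons, filter_triples]
      by_cases hr : rest = []
      · subst hr
        simp [triples, List.intercalate]
      · have htk : (rest.take (g-1)).isEmpty = false := by
          simp [List.isEmpty_iff, List.take_eq_nil_iff]
          constructor; omega; exact hr
        rw [htk]
        simp only [Bool.not_false, if_pos]
        exact (inter_pull _ x _ _).symm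

-- ===== VERDICT (by name: the statement is the Claim_ definition above) =====
theorem codons_spec : Claim_equal_codons := by
  intro seq number _
  unfold Spec_codons codons codons_alt
  simp only []
  -- align the (possibly reverse-complemented) sequence
  have hcs : (if number < 0 then revCompA seq.toList else seq.toList)
      = (if number < 0 then seq.toList.reverse.filterMap compB? else seq.toList) := by
    by_cases h : number < 0 <;> simp [h, revCompA_eq]
  rw [hcs]
  set cs := (if number < 0 then seq.toList.reverse.filterMap compB? else seq.toList) with hcsdef
  -- align the frame number
  have hn : (if number < 0 then |number| else number) = (if number < 0 then -number else number) := by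
    by_cases h : number < 0 <;> simp [h, abs_of_neg]
  rw [hn]
  set n := (if number < 0 then -number else number) with hndef
  -- first-group size
  set gN : Nat := (if n = 2 then 1 else if n = 3 then 2 else 3) with hgdef
  have hg1 : 1 ≤ gN := by unfold gN; split <;> [omega; (split <;> omega)]
  have hg3 : gN ≤ 3 := by unfold gN; split <;> [omega; (split <;> omega)]
  have hgInt : (if n == 2 then (1:Int) else if n == 3 then 2 else 3) = (gN : Int) := by
    unfold gN; by_cases h2 : n = 2 <;> by_cases h3 : n = 3 <;> simp [h2, h3]
  have hcount : (if n == 3 then (1:Int) else if n == 2 then 2 else if n == 1 then 0 else 0)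
      = 3 - (gN : Int) := by
    unfold gN; by_cases h2 : n = 2 <;> by_cases h3 : n = 3 <;> simp [h2, h3] <;> omega
  rw [hgInt]
  have hA : ((PySem.List.pyRange 0 (cs.length : Int) 1).foldl (codonsA_step cs)
      ([], if n == 3 then (1:Int) else if n == 2 then 2 else if n == 1 then 0 else 0)).1
      = walk cs (3 - (gN : Int)) := by
    rw [hcount, foldl_codonsA_step]
    simp
  rw [hA, walk_eq_join cs gN hg1 hg3]
  -- B's chunks: first slice is take gN, the mapped slices are the triples
  have hsl0 : PySem.List.slice cs (some 0) (some (gN : Int)) = cs.take gN := by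
    rw [PySem.List.slice_zero_start, PySem.List.slice_to_natCast]
  rw [hsl0, map_slice_eq_triples cs.length cs gN (by omega)]
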